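-- pv_equiv track=rewrite | github.com/RCPawn/algorithm-notes | day07/max_repeating.py | max_repeating1
-- ===== SOURCE A (Python) =====
-- def max_repeating1(sequence, word):
--     n, m = len(sequence), len(word)
--     dp = [0] * (n + 1)
--     max_count = 0
--     # 从后往前遍历 n - m ~ 0
--     for i in range(n - m, -1, -1):
--         if sequence[i:i + m] == word:
--             dp[i] = dp[i + m] + 1
--             max_count = max(max_count, dp[i])
--         else:
--             dp[i] = 0
--     return max_count
-- ===== SOURCE B (Python) =====
-- def max_repeating1(sequence, word):
--     # Grow the concatenated pattern and test containment: the answer is the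
--     # largest k with word*k a substring of sequence (empty word: 1, as "" repeats once).
--     if not word:
--         return 1
--     k = 0
--     t = word
--     while t in sequence:
--         k += 1
--         t += word
--     return k
-- ===== Notes on version B (the rewrite author's own statement) =====
-- stated objective: alternative
-- what changed: Instead of a backward dynamic program over every index with an O(m) slice comparison and a dp array, B repeatedly grows the concatenated pattern word*k and asks whether it is a substring of sequence (C-level 'in'), returning the largest k that is; no dp table or per-index scan at all.
import Mathlib
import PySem

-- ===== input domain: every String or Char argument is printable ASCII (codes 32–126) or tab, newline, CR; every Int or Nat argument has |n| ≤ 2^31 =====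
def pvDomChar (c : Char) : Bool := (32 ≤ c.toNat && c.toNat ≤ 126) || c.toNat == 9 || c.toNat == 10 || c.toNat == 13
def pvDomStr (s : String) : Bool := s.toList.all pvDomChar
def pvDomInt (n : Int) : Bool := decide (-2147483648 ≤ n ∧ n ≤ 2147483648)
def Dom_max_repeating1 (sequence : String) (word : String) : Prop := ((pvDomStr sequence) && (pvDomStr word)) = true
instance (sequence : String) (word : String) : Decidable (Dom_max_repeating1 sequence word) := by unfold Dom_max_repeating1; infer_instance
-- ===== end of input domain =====

-- B replaces A's backward per-index dynamic program by growing the concatenated pattern word*k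
-- and testing substring containment, returning the largest k that occurs (objective: alternative).

-- ===== PORT A =====
def max_repeating1 (sequence : String) (word : String) : Int :=
  let n := PySem.Str.len sequence
  let m := PySem.Str.len word
  let r := (PySem.List.pyRange (n - m) (-1) (-1)).foldl
    (fun (st : List Int × Int) i =>
      if PySem.Str.slice sequence (some i) (some (i + m)) = word then
        let dp' := PySem.List.pySetD st.1 i (PySem.List.pyGetD st.1 (i + m) 0 + 1)
        (dp', max st.2 (PySem.List.pyGetD dp' i 0))
      else (PySem.List.pySetD st.1 i 0, st.2))
    (List.replicate (n + 1).toNat (0 : Int), 0)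
  r.2

-- ===== PORT B =====
-- the 'while t in sequence' loop of Source B ('t in sequence' is PySem.Chars.isIn, 't += word' is ++);
-- the fuel only makes it total, it is proved never exhausted
def pvGrow (cs w : List Char) : Nat → Nat → List Char → Int
  | 0, k, _ => (k : Int)
  | f + 1, k, t => if PySem.Chars.isIn t cs then pvGrow cs w f (k + 1) (t ++ w) else (k : Int)

def max_repeating1_alt (sequence : String) (word : String) : Int :=
  if PySem.Str.len word = 0 then 1
  else pvGrow sequence.toList word.toList (sequence.toList.length + 2) 0 word.toList

-- ===== PRECONDITION & SPEC =====
def Spec_max_repeating1 (sequence : String) (word : String) (out : Int) : Prop := out = max_repeating1_alt sequence word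
instance (sequence : String) (word : String) (out : Int) : Decidable (Spec_max_repeating1 sequence word out) := by unfold Spec_max_repeating1; infer_instance

-- ===== CLAIM (what is proved, stated in full; the proofs are below) =====
def Claim_equal_max_repeating1 : Prop := ∀ (sequence : String) (word : String), Dom_max_repeating1 sequence word → Spec_max_repeating1 sequence word (max_repeating1 sequence word)

-- ===== LEMMAS AND PROOFS =====

-- chain length of repetitions of w starting at i (fuel-indexed; any fuel > cs.length is enough)
def pvChain (cs w : List Char) : Nat → Nat → Int
  | 0, _ => 0
  | f + 1, i => if w <+: cs.drop i then pvChain cs w f (i + w.length) + 1 else 0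

-- the value A's dp stores at i
def pvVal (cs w : List Char) (i : Nat) : Int :=
  if w <+: cs.drop i then
    (if w.length = 0 then 0 else pvChain cs w (cs.length + 1) (i + w.length)) + 1
  else 0

-- word repeated k times
def pvPow (w : List Char) (k : Nat) : List Char := (List.replicate k w).flatten

-- contents of A's dp list after the loop has processed all indices > i
def pvDp (cs w : List Char) (i : Int) : List Int :=
  (List.range (cs.length + 1)).map (fun j => if i < (j : Int) then pvVal cs w j else 0 : Nat → Int)

lemma pvOcc_le {cs w : List Char} {i : Nat} (hw : w ≠ []) (h : w <+: cs.drop i) :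
    i + w.length ≤ cs.length := by
  have h1 := h.length_le
  simp [List.length_drop] at h1
  have h2 : 0 < w.length := List.length_pos_iff.2 hw
  omega

lemma pvChain_stable {cs w : List Char} (hw : w ≠ []) :
    ∀ (f1 : Nat) (f2 i : Nat), cs.length + 1 - i ≤ f1 → cs.length + 1 - i ≤ f2 →
      pvChain cs w f1 i = pvChain cs w f2 i := by
  intro f1
  induction f1 with
  | zero =>
    intro f2 i h1 h2
    have hocc : ¬ w <+: cs.drop i := by
      rw [List.drop_eq_nil_of_le (by omega)]
      simpa [List.prefix_nil] using hw
    cases f2 with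
    | zero => rfl
    | succ g => simp [pvChain, hocc]
  | succ f ih =>
    intro f2 i h1 h2
    cases f2 with
    | zero =>
      have hocc : ¬ w <+: cs.drop i := by
        rw [List.drop_eq_nil_of_le (by omega)]
        simpa [List.prefix_nil] using hw
      simp [pvChain, hocc]
    | succ g =>
      by_cases hocc : w <+: cs.drop i
      · have hwl : 0 < w.length := List.length_pos_iff.2 hw
        simp only [pvChain, hocc, if_pos]
        rw [ih g (i + w.length) (by omega) (by omega)]
      · simp [pvChain, hocc]

lemma pvChain_eq_val {cs w : List Char} (hw : w ≠ []) (i : Nat) :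
    pvChain cs w (cs.length + 1) i = pvVal cs w i := by
  have hwl : 0 < w.length := List.length_pos_iff.2 hw
  by_cases hocc : w <+: cs.drop i
  · rw [show pvChain cs w (cs.length + 1) i
        = if w <+: cs.drop i then pvChain cs w cs.length (i + w.length) + 1 else 0 from rfl]
    rw [if_pos hocc, pvChain_stable hw cs.length (cs.length + 1) (i + w.length) (by omega) (by omega)]
    rw [pvVal, if_pos hocc, if_neg (by omega : ¬ w.length = 0)]
  · rw [show pvChain cs w (cs.length + 1) i
        = if w <+: cs.drop i then pvChain cs w cs.length (i + w.length) + 1 else 0 from rfl]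
    rw [if_neg hocc, pvVal, if_neg hocc]

lemma pvVal_nonneg (cs w : List Char) (i : Nat) : 0 ≤ pvVal cs w i := by
  unfold pvVal
  split_ifs with h1 h2
  · omega
  · have : ∀ f j, 0 ≤ pvChain cs w f j := by
      intro f
      induction f with
      | zero => intro j; simp [pvChain]
      | succ g ih =>
        intro j
        by_cases h : w <+: cs.drop j <;> simp [pvChain, h]
        have := ih (j + w.length); omega
    have := this (cs.length + 1) (i + w.length); omega
  · exact le_refl 0

lemma pvVal_zero {cs w : List Char} {i : Nat} (h : ¬ w <+: cs.drop i) : pvVal cs w i = 0 := by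
  simp [pvVal, h]

-- unfolding of pvVal as A's recurrence, for nonempty w
lemma pvVal_unfold {cs w : List Char} (hw : w ≠ []) (i : Nat) :
    pvVal cs w i = if w <+: cs.drop i then pvVal cs w (i + w.length) + 1 else 0 := by
  by_cases hocc : w <+: cs.drop i
  · rw [pvVal, if_pos hocc, if_neg (show ¬ w.length = 0 by have := List.length_pos_iff.2 hw; omega),
      pvChain_eq_val hw, if_pos hocc]
  · rw [pvVal_zero hocc, if_neg hocc]

lemma pvDp_get (cs w : List Char) (i : Int) (j : Nat) (hj : j < cs.length + 1) :
    (pvDp cs w i).getD j 0 = if i < (j : Int) then pvVal cs w j else 0 := by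
  unfold pvDp
  rw [List.getD_eq_getElem?_getD, List.getElem?_map, List.getElem?_range hj]
  rfl

lemma pvDp_set (cs w : List Char) {i : Int} (h0 : 0 ≤ i) :
    (pvDp cs w i).set i.toNat (pvVal cs w i.toNat) = pvDp cs w (i - 1) := by
  unfold pvDp
  apply List.ext_getElem
  · simp
  · intro k hk1 hk2
    simp only [List.getElem_set, List.getElem_map, List.getElem_range]
    by_cases hki : i.toNat = k
    · rw [if_pos hki, hki]
      rw [if_pos (by omega : i - 1 < (k : Int))]
    · rw [if_neg hki]
      have hcast : ((i.toNat : Nat) : Int) = i := by omega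
      by_cases hik : i < (k : Int)
      · rw [if_pos hik, if_pos (by omega)]
      · rw [if_neg hik, if_neg (by omega)]

lemma pvCond_iff (sequence word : String) {i : Int} (h0 : 0 ≤ i) :
    (PySem.Str.slice sequence (some i) (some (i + PySem.Str.len word)) = word)
      ↔ word.toList <+: sequence.toList.drop i.toNat := by
  have hm : PySem.Str.len word = (word.toList.length : Int) := by simp [pysem]
  rw [← String.toList_inj, PySem.Str.toList_slice, PySem.Chars.slice_eq_listSlice]
  rw [PySem.List.slice_toNat _ h0 (by omega : (0:Int) ≤ i + PySem.Str.len word)]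
  have ht : (i + PySem.Str.len word).toNat - i.toNat = word.toList.length := by
    rw [hm]; omega
  rw [ht, List.prefix_iff_eq_take, eq_comm]

lemma pvAloop (sequence word : String) :
    ∀ (fuel : Nat) (i mc : Int), i < fuel → -1 ≤ i →
      i ≤ (sequence.toList.length : Int) - word.toList.length → 0 ≤ mc →
      ((PySem.List.pyRange i (-1) (-1)).foldl
        (fun (st : List Int × Int) i =>
          if PySem.Str.slice sequence (some i) (some (i + PySem.Str.len word)) = word then
            let dp' := PySem.List.pySetD st.1 i (PySem.List.pyGetD st.1 (i + PySem.Str.len word) 0 + 1)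
            (dp', max st.2 (PySem.List.pyGetD dp' i 0))
          else (PySem.List.pySetD st.1 i 0, st.2))
        (pvDp sequence.toList word.toList i, mc)).2
      = (PySem.List.pyRange i (-1) (-1)).foldl
          (fun a j => max a (pvVal sequence.toList word.toList j.toNat)) mc := by
  set cs := sequence.toList with hcs
  set w := word.toList with hw
  have hm : PySem.Str.len word = (w.length : Int) := by simp [pysem, hw]
  intro fuel
  induction fuel with
  | zero =>
    intro i mc h1 h2 h3 h4
    have : i = -1 := by omega
    subst this
    rw [PySem.List.pyRange_neg_one_eq_nil (le_refl (-1))]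
    rfl
  | succ f ih =>
    intro i mc h1 h2 h3 h4
    by_cases hi : i = -1
    · subst hi
      rw [PySem.List.pyRange_neg_one_eq_nil (le_refl (-1))]
      rfl
    · have h0 : 0 ≤ i := by omega
      set t := i.toNat with htdef
      have hit : i = (t : Int) := by omega
      have htL : t + w.length ≤ cs.length := by
        by_cases hwnil : w = []
        · have hw0 : w.length = 0 := by simp [hwnil]
          omega
        · by_cases hocc : w <+: cs.drop t
          · exact pvOcc_le hwnil hocc
          · have hwl : 0 < w.length := List.length_pos_iff.2 hwnil
            omega
      rw [PySem.List.pyRange_neg_one_cons (by omega : (-1:Int) < i), List.foldl_cons,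
        List.foldl_cons]
      have hstep :
          (if PySem.Str.slice sequence (some i) (some (i + PySem.Str.len word)) = word then
            let dp' := PySem.List.pySetD (pvDp cs w i) i
              (PySem.List.pyGetD (pvDp cs w i) (i + PySem.Str.len word) 0 + 1)
            (dp', max mc (PySem.List.pyGetD dp' i 0))
          else (PySem.List.pySetD (pvDp cs w i) i 0, mc))
          = (pvDp cs w (i - 1), max mc (pvVal cs w t)) := by
        by_cases hcond : PySem.Str.slice sequence (some i) (some (i + PySem.Str.len word)) = word
        · have hocc : w <+: cs.drop t := (pvCond_iff sequence word h0).1 hcond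
          rw [if_pos hcond]
          have hread : PySem.List.pyGetD (pvDp cs w i) (i + PySem.Str.len word) 0 + 1
              = pvVal cs w t := by
            rw [hm, hit, show ((t:Int) + (w.length:Int)) = ((t + w.length : Nat) : Int) by push_cast; ring]
            rw [PySem.List.pyGetD_natCast, pvDp_get cs w _ _ (by omega)]
            by_cases hwnil : w = []
            · have hw0 : w.length = 0 := by simp [hwnil]
              rw [if_neg (by push_cast; omega : ¬ ((t:Int)) < ((t + w.length : Nat) : Int))]
              conv_rhs => rw [pvVal]
              rw [if_pos hocc, if_pos hw0]
            · have hwl : 0 < w.length := List.length_pos_iff.2 hwnil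
              rw [if_pos (by push_cast; omega : ((t:Int)) < ((t + w.length : Nat) : Int))]
              rw [← pvChain_eq_val hwnil (t + w.length)]
              conv_rhs => rw [pvVal]
              rw [if_pos hocc, if_neg (by omega : ¬ w.length = 0)]
          rw [hread]
          rw [PySem.List.pySetD_of_nonneg _ _ h0, ← htdef, pvDp_set cs w h0]
          have hmc : PySem.List.pyGetD (pvDp cs w (i - 1)) i 0 = pvVal cs w t := by
            rw [hit, PySem.List.pyGetD_natCast, pvDp_get cs w _ _ (by omega)]
            rw [if_pos (by omega : (t : Int) - 1 < (t : Int))]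
          simp only [hmc]
        · have hocc : ¬ w <+: cs.drop t := fun hc => hcond ((pvCond_iff sequence word h0).2 hc)
          rw [if_neg hcond]
          rw [show (0:Int) = pvVal cs w t from (pvVal_zero hocc).symm]
          rw [PySem.List.pySetD_of_nonneg _ _ h0, ← htdef, pvDp_set cs w h0]
          rw [show max mc (pvVal cs w t) = mc by rw [pvVal_zero hocc]; omega]
      rw [hstep]
      have := ih (i - 1) (max mc (pvVal cs w t)) (by omega) (by omega) (by omega)
        (le_trans h4 (le_max_left _ _))
      rw [this, ← htdef]

lemma pvDp_init (cs w : List Char) :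
    pvDp cs w ((cs.length : Int) - w.length) = List.replicate (cs.length + 1) 0 := by
  unfold pvDp
  apply List.ext_getElem
  · simp
  · intro k hk1 hk2
    have hkL : k < cs.length + 1 := by simpa using hk1
    simp only [List.getElem_map, List.getElem_range, List.getElem_replicate]
    split_ifs with hcond
    · apply pvVal_zero
      intro hocc
      by_cases hwnil : w = []
      · have hw0 : w.length = 0 := by simp [hwnil]
        omega
      · have := pvOcc_le hwnil hocc
        omega
    · rfl

lemma pvA_eq (sequence word : String) :
    max_repeating1 sequence word
      = (List.range (sequence.toList.length + 1 - word.toList.length)).foldl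
          (fun a k => max a (pvVal sequence.toList word.toList k)) 0 := by
  set cs := sequence.toList with hcs
  set w := word.toList with hw
  have hn : PySem.Str.len sequence = (cs.length : Int) := by simp [pysem, hcs]
  have hm : PySem.Str.len word = (w.length : Int) := by simp [pysem, hw]
  unfold max_repeating1
  dsimp only
  have hinit : List.replicate (PySem.Str.len sequence + 1).toNat (0 : Int)
      = pvDp cs w (PySem.Str.len sequence - PySem.Str.len word) := by
    rw [hn, hm, show (((cs.length : Int)) + 1).toNat = cs.length + 1 by omega, pvDp_init]
  by_cases hc : -1 ≤ PySem.Str.len sequence - PySem.Str.len word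
  · rw [hinit]
    rw [pvAloop sequence word (cs.length + 1) (PySem.Str.len sequence - PySem.Str.len word) 0
      (by rw [hn, hm]; omega) hc (by rw [hn, hm]) (le_refl 0)]
    rw [hn, hm, PySem.List.pyRange_neg_one_eq_reverse]
    rw [show (cs.length : Int) - (w.length : Int) + 1 = ((cs.length + 1 - w.length : Nat) : Int) by
      rw [hn, hm] at hc; omega]
    rw [show (-1 : Int) + 1 = (0 : Int) by norm_num]
    rw [PySem.List.pyRange_zero_natCast]
    rw [@List.Perm.foldl_eq _ _
      (fun (a j : Int) => max a (pvVal sequence.toList word.toList j.toNat)) _ _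
      ⟨fun a b c => max_right_comm _ _ _⟩ (List.reverse_perm _) 0]
    rw [List.foldl_map]
    simp only [Int.toNat_natCast]
    rfl
  · rw [PySem.List.pyRange_neg_one_eq_nil (by omega : PySem.Str.len sequence - PySem.Str.len word ≤ -1)]
    rw [hn, hm] at hc
    rw [show cs.length + 1 - w.length = 0 by omega]
    rfl

-- ===== B-side lemmas =====

lemma pvPow_zero (w : List Char) : pvPow w 0 = [] := rfl

lemma pvPow_succ (w : List Char) (k : Nat) : pvPow w (k + 1) = w ++ pvPow w k := by
  simp [pvPow, List.replicate_succ]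

lemma pvPow_succ' (w : List Char) (k : Nat) : pvPow w (k + 1) = pvPow w k ++ w := by
  simp [pvPow, List.replicate_succ']

lemma pvPow_length (w : List Char) (k : Nat) : (pvPow w k).length = k * w.length := by
  simp [pvPow]

-- (a ++ b) is a prefix of v iff a is and b is one of the rest
lemma pvPrefix_append {a b v : List Char} :
    (a ++ b) <+: v ↔ a <+: v ∧ b <+: v.drop a.length := by
  constructor
  · rintro ⟨r, hr⟩
    constructor
    · exact ⟨b ++ r, by rw [← hr, List.append_assoc]⟩
    · refine ⟨r, ?_⟩
      rw [← hr, List.append_assoc, List.drop_left]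
  · rintro ⟨ha, ⟨r, hr⟩⟩
    refine ⟨r, ?_⟩
    conv_rhs => rw [← List.take_append_drop a.length v, List.prefix_iff_eq_take.1 ha |>.symm]
    rw [List.append_assoc, hr]

-- infix iff prefix of some drop
lemma pvInfix_iff {l cs : List Char} : l <:+: cs ↔ ∃ i, l <+: cs.drop i := by
  constructor
  · rintro ⟨s, t, hst⟩
    exact ⟨s.length, ⟨t, by rw [← hst, List.append_assoc, List.drop_left]⟩⟩
  · rintro ⟨i, hi⟩
    exact List.IsInfix.trans hi.isInfix (cs.drop_suffix i).isInfix

-- dp value at i is at least k iff word repeated k times starts at i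
lemma pvVal_ge_iff {cs w : List Char} (hw : w ≠ []) :
    ∀ (k i : Nat), ((k : Int) ≤ pvVal cs w i) ↔ pvPow w k <+: cs.drop i := by
  intro k
  induction k with
  | zero =>
    intro i
    simp [pvPow_zero, pvVal_nonneg]
  | succ k ih =>
    intro i
    rw [pvPow_succ, pvPrefix_append, List.drop_drop, ← ih (i + w.length)]
    rw [pvVal_unfold hw i]
    by_cases hocc : w <+: cs.drop i
    · rw [if_pos hocc]
      constructor
      · intro h; exact ⟨hocc, by push_cast at h ⊢; omega⟩
      · rintro ⟨_, h⟩; push_cast at h ⊢; omega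
    · rw [if_neg hocc]
      constructor
      · intro h; exfalso; push_cast at h; omega
      · rintro ⟨h, _⟩; exact absurd h hocc

-- for nonempty w, some repetition count fails to occur
lemma pvStop {cs w : List Char} (hw : w ≠ []) : ¬ pvPow w (cs.length + 1) <:+: cs := by
  intro h
  have h1 := h.length_le
  rw [pvPow_length] at h1
  have h2 : 0 < w.length := List.length_pos_iff.2 hw
  nlinarith

-- B's loop computes the least k with word*(k+1) not a substring
lemma pvGrow_spec {cs w : List Char}
    (hex : ∃ k, ¬ pvPow w (k + 1) <:+: cs) :
    ∀ (f k : Nat), k ≤ Nat.find hex → Nat.find hex - k < f →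
      pvGrow cs w f k (pvPow w (k + 1)) = ((Nat.find hex : Nat) : Int) := by
  intro f
  induction f with
  | zero => intro k h1 h2; omega
  | succ f ih =>
    intro k h1 h2
    by_cases hk : k = Nat.find hex
    · subst hk
      rw [pvGrow, if_neg (by
        rw [Bool.not_eq_true, PySem.Chars.isIn_eq_false_iff]
        exact Nat.find_spec hex)]
    · have hlt : k < Nat.find hex := by omega
      have hocc : pvPow w (k + 1) <:+: cs := by
        have := Nat.find_min hex hlt
        tauto
      rw [pvGrow, if_pos ((PySem.Chars.isIn_iff_infix _ _).2 hocc), ← pvPow_succ' w (k + 1)]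
      exact ih (k + 1) (by omega) (by omega)

-- upper bound for the running max
lemma pvFoldl_max_le (f : Nat → Int) (c : Int) :
    ∀ (l : List Nat) (init : Int), init ≤ c → (∀ x ∈ l, f x ≤ c) →
      l.foldl (fun a x => max a (f x)) init ≤ c := by
  intro l
  induction l with
  | nil => intro init h _; exact h
  | cons x t ih =>
    intro init h hall
    exact ih _ (max_le h (hall x (by simp))) (fun y hy => hall y (by simp [hy]))

-- ===== VERDICT (by name: the statement is the Claim_ definition above) =====
theorem max_repeating1_spec : Claim_equal_max_repeating1 := by
  intro sequence word _
  unfold Spec_max_repeating1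
  set cs := sequence.toList with hcs
  set w := word.toList with hw
  have hm : PySem.Str.len word = (w.length : Int) := by simp [pysem, hw]
  rw [pvA_eq, ← hcs, ← hw]
  unfold max_repeating1_alt
  by_cases hwnil : w = []
  · -- empty word: A's fold is the constant 1 over a nonempty range, B returns 1
    rw [if_pos (by rw [hm, hwnil]; rfl)]
    have hval : ∀ i, pvVal cs w i = 1 := by
      intro i
      simp [pvVal, hwnil]
    have hle : (List.range (cs.length + 1 - w.length)).foldl
        (fun a k => max a (pvVal cs w k)) 0 ≤ 1 :=
      pvFoldl_max_le _ 1 _ 0 (by omega) (fun x _ => le_of_eq (hval x))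
    have hge := (PySem.List.le_foldl_max_int (List.range (cs.length + 1 - w.length))
      (fun k => pvVal cs w k) 0).2 0 (by simp [hwnil])
    rw [hval 0] at hge
    omega
  · rw [if_neg (by rw [hm]; simpa using List.length_pos_iff.2 hwnil |>.ne')]
    have hex : ∃ k, ¬ pvPow w (k + 1) <:+: cs := ⟨cs.length, pvStop hwnil⟩
    set K := Nat.find hex with hK
    have hKle : K ≤ cs.length := Nat.find_min' hex (pvStop hwnil)
    have hrun : pvGrow cs w (cs.length + 2) 0 w = (K : Int) := by
      have := pvGrow_spec hex (cs.length + 2) 0 (by omega) (by omega)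
      rwa [show pvPow w 1 = w by simp [pvPow]] at this
    rw [hrun]
    -- A's fold equals K
    have hle : (List.range (cs.length + 1 - w.length)).foldl
        (fun a k => max a (pvVal cs w k)) 0 ≤ (K : Int) := by
      apply pvFoldl_max_le _ _ _ 0 (by positivity)
      intro x _
      by_contra hcon
      have hx : ((K + 1 : Nat) : Int) ≤ pvVal cs w x := by push_cast; omega
      have := (pvVal_ge_iff hwnil (K + 1) x).1 hx
      exact Nat.find_spec hex (pvInfix_iff.2 ⟨x, this⟩)
    have hge : (K : Int) ≤ (List.range (cs.length + 1 - w.length)).foldl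
        (fun a k => max a (pvVal cs w k)) 0 := by
      rcases Nat.eq_zero_or_pos K with h0 | hpos
      · rw [h0]
        exact_mod_cast (PySem.List.le_foldl_max_int _ _ 0).1
      · have hoccK : pvPow w K <:+: cs := by
          have := Nat.find_min hex (show K - 1 < K by omega)
          rw [show K - 1 + 1 = K by omega] at this
          tauto
        obtain ⟨i, hi⟩ := pvInfix_iff.1 hoccK
        have hsplit : pvPow w K = w ++ pvPow w (K - 1) := by
          rw [← pvPow_succ, show K - 1 + 1 = K by omega]
        have hwpre : w <+: cs.drop i :=
          List.IsPrefix.trans ⟨pvPow w (K - 1), hsplit.symm⟩ hi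
        have hmem : i ∈ List.range (cs.length + 1 - w.length) := by
          have := pvOcc_le hwnil hwpre
          have hwl : 0 < w.length := List.length_pos_iff.2 hwnil
          exact List.mem_range.2 (by omega)
        have hKi : (K : Int) ≤ pvVal cs w i := (pvVal_ge_iff hwnil K i).2 hi
        exact le_trans hKi
          ((PySem.List.le_foldl_max_int _ (fun k => pvVal cs w k) 0).2 i hmem)
    omega
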